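-- pv_equiv track=rewrite | github.com/simtb/coding-puzzles | coding_problems/problems/zeros_to_fives.py | solution
-- ===== SOURCE A (Python) =====
-- def solution(number: int) -> int:
--     if number == 0:
--         return 5
--
--     tmp: int = number
--     power: int = 0
--
--     while tmp:
--         digit: int = tmp % 10
--         if digit == 0:
--             number_to_add: int = 5 * (10 ** power)
--             number += number_to_add
--         tmp //= 10
--         power += 1
--
--     return number
-- ===== SOURCE B (Python) =====
-- def solution(number: int) -> int:
--     if number < 10:
--         return number or 5
--     q, r = divmod(number, 10)
--     return solution(q) * 10 + (r or 5)
-- ===== Notes on version B (the rewrite author's own statement) =====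
-- stated objective: simpler
-- what changed: A iterates over digits and additively patches the original number with 5*10**power corrections; B recursively rebuilds the whole number from divmod(number,10), replacing each zero digit on the way back, with no power bookkeeping.
import Mathlib
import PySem

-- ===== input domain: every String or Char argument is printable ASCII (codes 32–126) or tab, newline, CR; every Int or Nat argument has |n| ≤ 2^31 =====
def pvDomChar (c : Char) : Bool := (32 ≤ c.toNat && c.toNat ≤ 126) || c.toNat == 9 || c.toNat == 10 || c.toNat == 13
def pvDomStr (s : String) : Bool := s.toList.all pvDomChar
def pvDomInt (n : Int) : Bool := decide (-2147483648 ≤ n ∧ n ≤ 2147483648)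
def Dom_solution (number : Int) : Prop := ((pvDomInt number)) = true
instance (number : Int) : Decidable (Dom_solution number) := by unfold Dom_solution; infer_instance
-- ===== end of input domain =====

-- B rebuilds the number recursively from divmod instead of A's additive 5*10**power patching loop.
-- A's while loop never terminates for negative number (tmp //= 10 stalls at -1), so Pre_ requires 0 ≤ number.

-- ===== PORT A =====
-- the `while tmp:` loop; state = (tmp, number, power).  For tmp < 0 Python diverges (outside
-- Pre_), so the recursion is guarded by 0 < tmp — exact on every input on which A returns.
def solutionLoop (tmp number : Int) (power : Nat) : Int :=
  if h : 0 < tmp then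
    let digit := PySem.Int.mod tmp 10
    solutionLoop (PySem.Int.floordiv tmp 10)
      (if digit = 0 then number + 5 * (10 : Int) ^ power else number) (power + 1)
  else number
termination_by tmp.toNat
decreasing_by
  have h10 : PySem.Int.floordiv tmp 10 = tmp / 10 := PySem.Int.floordiv_eq_ediv_of_pos (by omega)
  rw [h10]; omega

def solution (number : Int) : Int :=
  if number = 0 then 5
  else solutionLoop number number 0

-- ===== PORT B =====
def solution_alt (number : Int) : Int :=
  if h : number < 10 then
    (if number = 0 then 5 else number)          -- `number or 5`
  else
    let q := PySem.Int.floordiv number 10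
    let r := PySem.Int.mod number 10
    solution_alt q * 10 + (if r = 0 then 5 else r)
termination_by number.toNat
decreasing_by
  have h10 : PySem.Int.floordiv number 10 = number / 10 := PySem.Int.floordiv_eq_ediv_of_pos (by omega)
  rw [h10]; omega

-- ===== PRECONDITION & SPEC =====
-- A's while loop diverges for negative input (tmp //= 10 stays at -1), so those inputs are excluded.
def Pre_solution (number : Int) : Prop := 0 ≤ number
instance (number : Int) : Decidable (Pre_solution number) := by unfold Pre_solution; infer_instance

def pvWitness_solution : Int := 1050

def Spec_solution (number : Int) (out : Int) : Prop := out = solution_alt number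
instance (number : Int) (out : Int) : Decidable (Spec_solution number out) := by unfold Spec_solution; infer_instance

-- ===== CLAIM (what is proved, stated in full; the proofs are below) =====
def Claim_equal_solution : Prop := ∀ (number : Int), Dom_solution number → Pre_solution number → Spec_solution number (solution number)

-- ===== LEMMAS AND PROOFS =====

-- A's loop adds exactly what B's rebuild changes, scaled by the pending positional weight.
lemma solutionLoop_char : ∀ (k : Nat) (tmp : Int), tmp.toNat ≤ k → 0 < tmp →
    ∀ (number : Int) (power : Nat),
      solutionLoop tmp number power = number + (solution_alt tmp - tmp) * (10 : Int) ^ power := by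
  intro k
  induction k with
  | zero => intro tmp hk htmp; omega
  | succ k ih =>
    intro tmp hk htmp number power
    have hmod : PySem.Int.mod tmp 10 = tmp % 10 := PySem.Int.mod_eq_emod_of_pos (by omega)
    have hdiv : PySem.Int.floordiv tmp 10 = tmp / 10 := PySem.Int.floordiv_eq_ediv_of_pos (by omega)
    rw [solutionLoop, dif_pos htmp]
    by_cases hsmall : tmp < 10
    · -- single digit: digit = tmp ≠ 0, quotient 0, loop stops; solution_alt tmp = tmp
      have hm : tmp % 10 = tmp := Int.emod_eq_of_lt (by omega) (by omega)
      have hd : tmp / 10 = 0 := Int.ediv_eq_zero_of_lt (by omega) (by omega)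
      rw [solution_alt, dif_pos hsmall, if_neg (by omega : ¬ tmp = 0)]
      simp only [hmod, hdiv, hm, hd, if_neg (by omega : ¬ tmp = 0)]
      rw [solutionLoop]
      simp
    · -- tmp ≥ 10: recurse on q = tmp / 10
      have hq : 0 < tmp / 10 := by omega
      have hqk : (tmp / 10).toNat ≤ k := by omega
      have hrec := ih (tmp / 10) hqk hq
      have htq : tmp / 10 * 10 + tmp % 10 = tmp := by omega
      rw [solution_alt, dif_neg (by omega : ¬ tmp < 10)]
      simp only [hmod, hdiv]
      by_cases hr : tmp % 10 = 0
      · rw [if_pos hr, if_pos hr, hrec, pow_succ]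
        linear_combination (-(10:Int) ^ power) * htq + (10:Int) ^ power * hr
      · rw [if_neg hr, if_neg hr, hrec, pow_succ]
        linear_combination (-(10:Int) ^ power) * htq

-- ===== VERDICT (by name: the statement is the Claim_ definition above) =====
theorem solution_spec : Claim_equal_solution := by
  intro number _ hpre
  unfold Pre_solution at hpre
  unfold Spec_solution solution
  by_cases h0 : number = 0
  · subst h0; rw [if_pos rfl, solution_alt]; norm_num
  · rw [if_neg h0, solutionLoop_char number.toNat number le_rfl (by omega) number 0]
    ring
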